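-- pv_equiv track=rewrite | github.com/emanuellegrody/SALVEseq | extractionScripts/barcode/stepOne_EG.py | match_index
-- ===== SOURCE A (Python) =====
-- def hamming_distance(s1, s2):
--     """Count mismatches between two equal-length strings."""
--     if len(s1) != len(s2):
--         return max(len(s1), len(s2))  # length mismatch = treat as max distance
--     return sum(c1 != c2 for c1, c2 in zip(s1, s2))
--
-- def match_index(read_indices, index_lookup, index_lengths, max_mismatches):
--     """Match a read's index to a sample, allowing up to max_mismatches.
--
--     The read's index field may be dual-indexed (i7+i5). Since the user provides only
--     one index, we check each component of the read's index against all sample indices.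
--
--     Uses exact lookup first (O(1)), falls back to hamming distance scan only if needed.
--     """
--     for read_idx in read_indices:
--         # Only compare if lengths match — different-length indices are from different
--         # index reads (i7 vs i5) and should not be compared.
--         if len(read_idx) not in index_lengths:
--             continue
--
--         # Fast path: exact match
--         if read_idx in index_lookup:
--             return index_lookup[read_idx]
--
--         # Slow path: allow mismatches. Only reached for reads with sequencing
--         # errors in the index. Iterates all sample indices but this is rare.
--         if max_mismatches > 0:
--             best_state = None
--             best_dist = max_mismatches + 1
--             for sample_idx, state in index_lookup.items():
--                 if len(sample_idx) != len(read_idx):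
--                     continue
--                 dist = hamming_distance(read_idx, sample_idx)
--                 if dist < best_dist:
--                     best_dist = dist
--                     best_state = state
--                 elif dist == best_dist and best_state is not None:
--                     # Ambiguous: two indices equally close. Do not assign.
--                     best_state = None
--             if best_state is not None and best_dist <= max_mismatches:
--                 return best_state
--
--     return None
-- ===== SOURCE B (Python) =====
-- def match_index(read_indices, index_lookup, index_lengths, max_mismatches):
--     for read_idx in read_indices:
--         if len(read_idx) not in index_lengths:
--             continue
--         if read_idx in index_lookup:
--             return index_lookup[read_idx]
--         if max_mismatches > 0:
--             cands = [(sum(a != b for a, b in zip(read_idx, s)), state)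
--                      for s, state in index_lookup.items() if len(s) == len(read_idx)]
--             if cands:
--                 d_min = min(d for d, _ in cands)
--                 hits = [state for d, state in cands if d == d_min]
--                 if d_min <= max_mismatches and len(hits) == 1:
--                     return hits[0]
--     return None
-- ===== Notes on version B (the rewrite author's own statement) =====
-- stated objective: simpler
-- what changed: The mismatch branch's inline best/ambiguity state machine (best_dist sentinel max_mismatches+1, tie-resets to None) is replaced by a declarative collect-then-reduce pass: build (distance, state) candidates, take the minimum distance, and return the state only if it is within budget and uniquely attained.
import Mathlib
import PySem

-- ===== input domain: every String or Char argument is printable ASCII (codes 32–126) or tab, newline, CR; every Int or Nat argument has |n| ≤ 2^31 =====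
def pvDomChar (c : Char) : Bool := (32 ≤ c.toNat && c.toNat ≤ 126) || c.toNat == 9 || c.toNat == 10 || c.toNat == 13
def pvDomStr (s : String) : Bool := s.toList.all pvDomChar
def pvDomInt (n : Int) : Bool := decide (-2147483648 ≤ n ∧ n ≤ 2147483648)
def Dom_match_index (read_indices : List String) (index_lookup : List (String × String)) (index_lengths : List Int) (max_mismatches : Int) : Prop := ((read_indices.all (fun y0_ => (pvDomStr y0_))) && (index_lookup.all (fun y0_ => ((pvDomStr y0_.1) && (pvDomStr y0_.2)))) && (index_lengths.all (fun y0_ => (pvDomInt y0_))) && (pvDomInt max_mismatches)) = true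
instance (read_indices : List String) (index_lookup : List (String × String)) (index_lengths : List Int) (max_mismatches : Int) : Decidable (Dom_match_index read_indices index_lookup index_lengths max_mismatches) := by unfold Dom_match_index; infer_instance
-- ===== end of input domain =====

-- B replaces A's inline best/ambiguity tracking in the mismatch branch by a collect-then-reduce
-- pass (candidates, minimum distance, unique-achiever check): simpler, same cost.


-- ===== PORT A =====
def hamming_distance (s1 s2 : String) : Int :=
  if s1.toList.length ≠ s2.toList.length then (max s1.toList.length s2.toList.length : Int)
  else ((s1.toList.zip s2.toList).countP (fun p => p.1 ≠ p.2) : Int)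

-- the inner `for sample_idx, state in index_lookup.items()` loop with its (best_state, best_dist) state
def matchScanA (r : String) (items : List (String × String)) (mm : Int) : Option String × Int :=
  items.foldl (fun acc p =>
    if p.1.toList.length ≠ r.toList.length then acc
    else
      let dist := hamming_distance r p.1
      if dist < acc.2 then (some p.2, dist)
      else if dist = acc.2 ∧ acc.1 ≠ none then (none, acc.2)
      else acc) (none, mm + 1)

-- the outer `for read_idx in read_indices` loop
def matchGoA (d : PySem.Dict String String) (index_lengths : List Int) (mm : Int) : List String → Option String
  | [] => none
  | r :: rest =>
    if (r.toList.length : Int) ∉ index_lengths then matchGoA d index_lengths mm rest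
    else if d.contains r then d.get? r
    else if mm > 0 then
      let bs := matchScanA r d.items mm
      if bs.1 ≠ none ∧ bs.2 ≤ mm then bs.1 else matchGoA d index_lengths mm rest
    else matchGoA d index_lengths mm rest

def match_index (read_indices : List String) (index_lookup : List (String × String)) (index_lengths : List Int) (max_mismatches : Int) : Option String :=
  matchGoA (PySem.Dict.ofList index_lookup) index_lengths max_mismatches read_indices

-- ===== PORT B =====
-- candidates = [(hamming, state) for equal-length sample indices]
def candsB (r : String) (items : List (String × String)) : List (Int × String) :=
  (items.filter (fun p => p.1.toList.length = r.toList.length)).map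
    (fun p => (((r.toList.zip p.1.toList).countP (fun q => q.1 ≠ q.2) : Int), p.2))

def matchGoB (d : PySem.Dict String String) (index_lengths : List Int) (mm : Int) : List String → Option String
  | [] => none
  | r :: rest =>
    if (r.toList.length : Int) ∉ index_lengths then matchGoB d index_lengths mm rest
    else if d.contains r then d.get? r
    else if mm > 0 then
      let cands := candsB r d.items
      match PySem.List.min? (cands.map (·.1)) (fun y => y) with
      | none => matchGoB d index_lengths mm rest
      | some dmin =>
        let hits := (cands.filter (fun p => p.1 = dmin)).map (·.2)
        if dmin ≤ mm ∧ hits.length = 1 then hits.head?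
        else matchGoB d index_lengths mm rest
    else matchGoB d index_lengths mm rest

def match_index_alt (read_indices : List String) (index_lookup : List (String × String)) (index_lengths : List Int) (max_mismatches : Int) : Option String :=
  matchGoB (PySem.Dict.ofList index_lookup) index_lengths max_mismatches read_indices

-- ===== PRECONDITION & SPEC =====
def Spec_match_index (read_indices : List String) (index_lookup : List (String × String)) (index_lengths : List Int) (max_mismatches : Int) (out : Option String) : Prop := out = match_index_alt read_indices index_lookup index_lengths max_mismatches
instance (read_indices : List String) (index_lookup : List (String × String)) (index_lengths : List Int) (max_mismatches : Int) (out : Option String) : Decidable (Spec_match_index read_indices index_lookup index_lengths max_mismatches out) := by unfold Spec_match_index; infer_instance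

-- ===== CLAIM (what is proved, stated in full; the proofs are below) =====
def Claim_equal_match_index : Prop := ∀ (read_indices : List String) (index_lookup : List (String × String)) (index_lengths : List Int) (max_mismatches : Int), Dom_match_index read_indices index_lookup index_lengths max_mismatches → Spec_match_index read_indices index_lookup index_lengths max_mismatches (match_index read_indices index_lookup index_lengths max_mismatches)

-- ===== LEMMAS AND PROOFS =====

-- A's inner scan over the items IS the fold of the plain step over B's candidate list
def stepA (acc : Option String × Int) (c : Int × String) : Option String × Int :=
  if c.1 < acc.2 then (some c.2, c.1)
  else if c.1 = acc.2 ∧ acc.1 ≠ none then (none, acc.2)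
  else acc

lemma scanA_eq_foldl_cands (r : String) (items : List (String × String)) (s : Option String × Int) :
    items.foldl (fun acc p =>
      if p.1.toList.length ≠ r.toList.length then acc
      else
        let dist := hamming_distance r p.1
        if dist < acc.2 then (some p.2, dist)
        else if dist = acc.2 ∧ acc.1 ≠ none then (none, acc.2)
        else acc) s
    = (candsB r items).foldl stepA s := by
  induction items generalizing s with
  | nil => simp [candsB]
  | cons p t ih =>
    rw [List.foldl_cons]
    by_cases h : p.1.length = r.length
    · have hcands : candsB r (p :: t)
          = (((r.toList.zip p.1.toList).countP (fun q => q.1 ≠ q.2) : Int), p.2) :: candsB r t := by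
        simp [candsB, List.filter, h]
      rw [hcands, List.foldl_cons, ih]
      congr 1
      have hlen : ¬ p.1.toList.length ≠ r.toList.length := by simpa using h
      rw [if_neg hlen]
      have hham : hamming_distance r p.1
          = ((r.toList.zip p.1.toList).countP (fun q => q.1 ≠ q.2) : Int) := by
        simp [hamming_distance, h]
      simp only [hham, stepA]
    · have hcands : candsB r (p :: t) = candsB r t := by
        simp [candsB, List.filter, h]
      rw [hcands, if_pos (by simpa using h), ih]

-- closed form of the (best_state, best_dist) fold, for any start state
lemma foldl_stepA_char (C : List (Int × String)) (b : Option String) (d0 : Int) :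
    C.foldl stepA (b, d0) =
      match PySem.List.min? (C.map (·.1)) (fun y => y) with
      | none => (b, d0)
      | some m =>
        if m < d0 then
          (if ((C.filter (fun p => p.1 = m)).map (·.2)).length = 1
            then ((C.filter (fun p => p.1 = m)).map (·.2)).head? else none, m)
        else if m = d0 then (none, d0)
        else (b, d0) := by
  induction C generalizing b d0 with
  | nil => simp [PySem.List.min?]
  | cons c t ih =>
    obtain ⟨d, st⟩ := c
    have hmin : ∀ (x : Int) (xs : List Int), PySem.List.min? (x :: xs) (fun y => y) =
        some (xs.foldl min x) := fun x xs => PySem.List.min?_id_cons x xs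
    rcases ht : t.map (·.1) with _ | ⟨x, xs⟩
    · -- t contributes no candidates: t = []
      have ht' : t = [] := by cases t <;> simp_all
      subst ht'
      simp only [List.foldl_cons, List.foldl_nil, List.map_cons, List.map_nil, hmin]
      by_cases h1 : d < d0
      · simp [stepA, h1, List.filter]
      · by_cases h2 : d = d0
        · subst h2
          cases b <;> simp [stepA]
        · simp [stepA, h1, h2]
    · -- t is nonempty with minimum m'
      obtain ⟨m', htmin⟩ : ∃ m, PySem.List.min? (t.map (·.1)) (fun y => y) = some m :=
        ⟨_, by rw [ht]; exact hmin x xs⟩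
      have hm' : m' = xs.foldl min x := by
        rw [ht, hmin] at htmin; exact (Option.some.inj htmin).symm
      have hconsmin : PySem.List.min? (((d, st) :: t).map (·.1)) (fun y => y)
          = some (min m' d) := by
        simp only [List.map_cons, ht, hmin, List.foldl_cons]
        rw [List.foldl_assoc, hm']
        rw [min_comm d _]
      rw [List.foldl_cons, hconsmin]
      have hmem : m' ∈ t.map (·.1) := PySem.List.min?_mem (key := fun y => (y : Int)) htmin
      have hmem' : ∃ p ∈ t, p.1 = m' := by
        obtain ⟨p, hp, hp1⟩ := List.mem_map.mp hmem; exact ⟨p, hp, hp1⟩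
      have hisMin : ∀ p ∈ t, m' ≤ p.1 := by
        intro p hp
        exact PySem.List.min?_isMin (key := fun y => (y : Int)) htmin p.1
          (List.mem_map.mpr ⟨p, hp, rfl⟩)
      by_cases h1 : d < d0
      · rw [show stepA (b, d0) (d, st) = (some st, d) by simp [stepA, h1]]
        rw [ih (some st) d, htmin]
        rcases lt_trichotomy m' d with hlt | heq | hgt
        · have hmd : min m' d = m' := min_eq_left hlt.le
          have hfil : ((d, st) :: t).filter (fun p => p.1 = m')
              = t.filter (fun p => p.1 = m') := by
            simp [List.filter, show ¬ (d = m') by omega]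
          simp only [hmd, if_pos hlt, if_pos (lt_trans hlt h1), hfil]
        · subst heq
          have hmd : min m' m' = m' := min_self m'
          have hfil : ((m', st) :: t).filter (fun p => p.1 = m')
              = (m', st) :: t.filter (fun p => p.1 = m') := by
            simp [List.filter]
          have hpos : 0 < (t.filter (fun p => p.1 = m')).length := by
            rw [List.length_pos_iff]
            intro hnil
            obtain ⟨p, hp, hp1⟩ := hmem'
            have : p ∈ t.filter (fun q => decide (q.1 = m')) :=
              List.mem_filter_of_mem hp (by simp [hp1])
            rw [hnil] at this; simp at this
          simp only [hmd, lt_irrefl, if_pos h1, hfil,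
            List.map_cons, List.length_cons, List.length_map, if_true]
          rw [if_neg (show ¬ ((t.filter (fun p => decide (p.1 = m'))).length + 1 = 1) by omega)]
          simp
        · have hmd : min m' d = d := min_eq_right hgt.le
          have hfil : ((d, st) :: t).filter (fun p => p.1 = d)
              = (d, st) :: t.filter (fun p => p.1 = d) := by
            simp [List.filter]
          have hnil : t.filter (fun p => p.1 = d) = [] := by
            rw [List.filter_eq_nil_iff]
            intro p hp
            have := hisMin p hp
            simp only [decide_eq_true_eq]
            omega
          simp only [hmd, if_neg (by omega : ¬ m' < d), if_neg (by omega : ¬ m' = d),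
            if_pos h1, hfil, hnil]
          simp
      · by_cases h2 : d = d0
        · subst h2
          have hstep : stepA (b, d) (d, st) = (none, d) := by
            cases b <;> simp [stepA]
          rw [hstep, ih none d, htmin]
          rcases lt_trichotomy m' d with hlt | heq | hgt
          · have hmd : min m' d = m' := min_eq_left hlt.le
            have hne : ¬ (d = m') := by omega
            simp [hmd, hlt, hne]
          · subst heq
            simp
          · have hmd : min m' d = d := min_eq_right hgt.le
            simp [hmd, show ¬ m' < d by omega, show ¬ m' = d by omega]
        · have hstep : stepA (b, d0) (d, st) = (b, d0) := by
            simp [stepA, h1, h2]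
          rw [hstep, ih b d0, htmin]
          have hd0d : d0 < d := by omega
          rcases lt_trichotomy m' d with hlt | heq | hgt
          · have hmd : min m' d = m' := min_eq_left hlt.le
            have hfil : ((d, st) :: t).filter (fun p => p.1 = m')
                = t.filter (fun p => p.1 = m') := by
              simp [List.filter, show ¬ (d = m') by omega]
            simp only [hmd, hfil]
          · subst heq
            have hmd : min m' m' = m' := min_self m'
            simp only [hmd, if_neg (show ¬ m' < d0 by omega),
              if_neg (show ¬ m' = d0 by omega)]
          · have hmd : min m' d = d := min_eq_right hgt.le
            simp only [hmd, if_neg h1, if_neg h2,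
              if_neg (show ¬ m' < d0 by omega), if_neg (show ¬ m' = d0 by omega)]

-- per-read equivalence of the mismatch branch, then the outer loops agree
lemma goA_eq_goB (d : PySem.Dict String String) (lens : List Int) (mm : Int)
    (rs : List String) : matchGoA d lens mm rs = matchGoB d lens mm rs := by
  induction rs with
  | nil => rfl
  | cons r rest ih =>
    rw [matchGoA, matchGoB]
    by_cases hlen : (r.toList.length : Int) ∉ lens
    · rw [if_pos hlen, if_pos hlen, ih]
    · rw [if_neg hlen, if_neg hlen]
      by_cases hc : d.contains r
      · rw [if_pos hc, if_pos hc]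
      · rw [if_neg hc, if_neg hc]
        by_cases hmm : mm > 0
        · rw [if_pos hmm, if_pos hmm, matchScanA, scanA_eq_foldl_cands, foldl_stepA_char]
          rcases hm : PySem.List.min? ((candsB r d.items).map (·.1)) (fun y => y) with _ | m
          · simp only [hm]
            simp [ih]
          · simp only [hm]
            by_cases h1 : m < mm + 1
            · by_cases hl : ((candsB r d.items).filter (fun p => p.1 = m)).length = 1
              · simp [h1, hl, show m ≤ mm by omega]
                intro hno
                exfalso
                have hne : (candsB r d.items).filter (fun p => p.1 = m) ≠ [] := by
                  intro hnil; rw [hnil] at hl; simp at hl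
                obtain ⟨⟨p1, p2⟩, hp⟩ := List.exists_mem_of_ne_nil _ hne
                have hp' := List.mem_filter.mp hp
                have hp1 : p1 = m := by simpa using hp'.2
                subst hp1
                exact hno p2 hp'.1
              · simp [h1, hl, ih]
            · have hle : ¬ m ≤ mm := by omega
              by_cases h2 : m = mm + 1
              · simp [h2, ih]
              · simp [h1, h2, hle, ih]
        · rw [if_neg hmm, if_neg hmm, ih]

-- ===== VERDICT (by name: the statement is the Claim_ definition above) =====
theorem match_index_spec : Claim_equal_match_index := by
  intro reads lookup lens mm _
  show match_index reads lookup lens mm = match_index_alt reads lookup lens mm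
  exact goA_eq_goB _ lens mm reads
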